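-- pv_equiv track=rewrite | github.com/amtsu/team22 | users/kaanikin/exercise/hw5/hw5_part2.py | total_fruit_cost
-- ===== SOURCE A (Python) =====
-- def is_dict(some_dict):
--     return isinstance(some_dict, dict)
--
-- def total_fruit_cost(fruit_qty, fruit_prices):
--
--     if (is_dict(fruit_qty) == False) or (is_dict(fruit_prices) == False):
--         raise TypeError ('На вход подан не словарь')
--
--     total_cost = 0
--
--     for item in fruit_prices:
--         if item not in fruit_qty:
--             raise ValueError ('Заданый элемент отсутствует в словаре с ассортиментом')
--         elif item not in fruit_prices:
--             raise ValueError ('Заданый элемент отсутствует в словаре с ценами')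
--         else:
--             total_cost += fruit_qty[item]*fruit_prices[item]
--
--     return total_cost
-- ===== SOURCE B (Python) =====
-- def total_fruit_cost(fruit_qty, fruit_prices):
--     if not isinstance(fruit_qty, dict) or not isinstance(fruit_prices, dict):
--         raise TypeError('На вход подан не словарь')
--     # Validate by key-set algebra: any priced fruit missing from the assortment?
--     if fruit_prices.keys() - fruit_qty.keys():
--         raise ValueError('Заданый элемент отсутствует в словаре с ассортиментом')
--     # Accumulate over the ASSORTMENT; absent prices contribute 0 via .get,
--     # which is exact because every priced fruit is in the assortment.
--     return sum(qty * fruit_prices.get(name, 0) for name, qty in fruit_qty.items())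
-- ===== Notes on version B (the rewrite author's own statement) =====
-- stated objective: alternative
-- what changed: Validation becomes a key-set subtraction (fruit_prices.keys() - fruit_qty.keys()) and the total is accumulated by iterating over the OTHER dict (the assortment) with price lookups defaulting to 0, instead of A's fused raise-or-accumulate loop over the price dict; correct because missing prices contribute 0 and validation guarantees price keys are a subset of assortment keys.
import Mathlib
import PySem

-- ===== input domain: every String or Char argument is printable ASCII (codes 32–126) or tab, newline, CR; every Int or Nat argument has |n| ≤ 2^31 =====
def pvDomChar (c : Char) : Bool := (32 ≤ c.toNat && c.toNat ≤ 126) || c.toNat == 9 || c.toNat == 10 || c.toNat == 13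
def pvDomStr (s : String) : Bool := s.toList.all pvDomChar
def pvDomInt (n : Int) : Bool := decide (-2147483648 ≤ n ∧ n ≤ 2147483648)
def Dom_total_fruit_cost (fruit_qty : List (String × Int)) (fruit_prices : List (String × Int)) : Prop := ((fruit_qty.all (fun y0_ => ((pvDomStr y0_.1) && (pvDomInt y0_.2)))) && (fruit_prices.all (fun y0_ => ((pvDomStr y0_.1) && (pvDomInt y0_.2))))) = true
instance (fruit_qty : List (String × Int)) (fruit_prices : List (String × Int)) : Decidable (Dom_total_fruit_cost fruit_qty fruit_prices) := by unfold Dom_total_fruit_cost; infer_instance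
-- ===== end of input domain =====

-- B validates by key-set subtraction and accumulates over the ASSORTMENT dict with
-- price lookups defaulting to 0, instead of A's fused raise-or-accumulate loop over
-- the price dict; same return values on Pre_, no speed claim.


-- ===== PORT A =====
-- Fused loop over the price dict's keys: an Option Int accumulator, none = the ValueError
-- raised when a key is missing from fruit_qty (the second elif is unreachable, as in A).
def total_fruit_cost (fruit_qty : List (String × Int)) (fruit_prices : List (String × Int)) : Int :=
  let q := PySem.Dict.ofList fruit_qty
  let p := PySem.Dict.ofList fruit_prices
  ((p.keys).foldl (fun acc item =>
      acc.bind (fun t =>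
        if q.contains item then some (t + q.getD item 0 * p.getD item 0) else none))
    (some 0)).getD 0

-- ===== PORT B =====
-- Key-set subtraction for validation, then a sum over the ASSORTMENT's items with
-- price lookups defaulting to 0 (fruit_prices.get(name, 0)).
def total_fruit_cost_alt (fruit_qty : List (String × Int)) (fruit_prices : List (String × Int)) : Int :=
  let q := PySem.Dict.ofList fruit_qty
  let p := PySem.Dict.ofList fruit_prices
  if (p.keys.filter (fun k => !(q.contains k))).isEmpty then
    (q.items.map (fun kv => kv.2 * p.getD kv.1 0)).sum
  else 0  -- B raises ValueError here; outside Pre_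

-- ===== PRECONDITION & SPEC =====
-- Pre_ excludes exactly the inputs where A raises ValueError: a priced fruit absent from the assortment.
def Pre_total_fruit_cost (fruit_qty : List (String × Int)) (fruit_prices : List (String × Int)) : Prop :=
  ∀ k ∈ (PySem.Dict.ofList fruit_prices).keys, (PySem.Dict.ofList fruit_qty).contains k = true
instance (fruit_qty : List (String × Int)) (fruit_prices : List (String × Int)) : Decidable (Pre_total_fruit_cost fruit_qty fruit_prices) := by unfold Pre_total_fruit_cost; infer_instance
def pvWitness_total_fruit_cost : (List (String × Int)) × (List (String × Int)) :=
  ([("apple", 2), ("pear", 5)], [("apple", 3)])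
def Spec_total_fruit_cost (fruit_qty : List (String × Int)) (fruit_prices : List (String × Int)) (out : Int) : Prop := out = total_fruit_cost_alt fruit_qty fruit_prices
instance (fruit_qty : List (String × Int)) (fruit_prices : List (String × Int)) (out : Int) : Decidable (Spec_total_fruit_cost fruit_qty fruit_prices out) := by unfold Spec_total_fruit_cost; infer_instance

-- ===== CLAIM (what is proved, stated in full; the proofs are below) =====
def Claim_equal_total_fruit_cost : Prop := ∀ (fruit_qty : List (String × Int)) (fruit_prices : List (String × Int)), Dom_total_fruit_cost fruit_qty fruit_prices → Pre_total_fruit_cost fruit_qty fruit_prices → Spec_total_fruit_cost fruit_qty fruit_prices (total_fruit_cost fruit_qty fruit_prices)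

-- ===== LEMMAS AND PROOFS =====

-- A's Option fold over fully-present keys is the sum over those keys, shifted by the accumulator.
theorem pv_fold_eq_sum (q p : PySem.Dict String Int) (ks : List String)
    (h : ∀ k ∈ ks, q.contains k = true) (t : Int) :
    (ks.foldl (fun acc item =>
        acc.bind (fun t =>
          if q.contains item then some (t + q.getD item 0 * p.getD item 0) else none))
      (some t)).getD 0
    = t + (ks.map (fun k => q.getD k 0 * p.getD k 0)).sum := by
  induction ks generalizing t with
  | nil => simp
  | cons k ks ih =>
    have hk : q.contains k = true := h k (List.mem_cons_self)
    simp only [List.foldl_cons, Option.bind_some, hk, if_true, List.map_cons, List.sum_cons]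
    rw [ih (fun x hx => h x (List.mem_cons_of_mem _ hx))]
    ring

-- B's sum over q's keys equals the same sum over p's keys: keys of q outside p contribute 0,
-- and the surviving key list is a permutation of p's keys.
theorem pv_sum_swap (q p : PySem.Dict String Int)
    (hq : q.keys.Nodup) (hp : p.keys.Nodup)
    (h : ∀ k ∈ p.keys, q.contains k = true) :
    (q.keys.map (fun k => q.getD k 0 * p.getD k 0)).sum
    = (p.keys.map (fun k => q.getD k 0 * p.getD k 0)).sum := by
  have hsplit : q.keys.map (fun k => q.getD k 0 * p.getD k 0)
      = q.keys.map (fun k => if p.contains k then q.getD k 0 * p.getD k 0 else 0) := by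
    apply List.map_congr_left
    intro k _
    by_cases hc : p.contains k = true
    · simp [hc]
    · simp only [Bool.not_eq_true] at hc
      simp [PySem.Dict.getD_of_not_contains _ _ hc]
  have hperm : (q.keys.filter (fun k => p.contains k)).Perm p.keys := by
    rw [List.perm_ext_iff_of_nodup (List.Nodup.filter _ hq) hp]
    intro a
    simp only [List.mem_filter]
    constructor
    · rintro ⟨_, hc⟩
      exact (PySem.Dict.contains_iff_mem_keys _ _).1 hc
    · intro ha
      exact ⟨(PySem.Dict.contains_iff_mem_keys _ _).1 (h a ha),
             (PySem.Dict.contains_iff_mem_keys _ _).2 ha⟩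
  calc (q.keys.map (fun k => q.getD k 0 * p.getD k 0)).sum
      = (q.keys.map (fun k => if p.contains k then q.getD k 0 * p.getD k 0 else 0)).sum := by
        rw [hsplit]
    _ = ((q.keys.filter (fun k => p.contains k)).map (fun k => q.getD k 0 * p.getD k 0)).sum := by
        induction q.keys with
        | nil => simp
        | cons x xs ih =>
          by_cases hx : p.contains x = true
          · simp [hx, ih]
          · simp only [Bool.not_eq_true] at hx
            simp [hx, ih]
    _ = (p.keys.map (fun k => q.getD k 0 * p.getD k 0)).sum :=
        (hperm.map _).sum_eq

-- ===== VERDICT (by name: the statement is the Claim_ definition above) =====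
theorem total_fruit_cost_spec : Claim_equal_total_fruit_cost := by
  intro fruit_qty fruit_prices _ hpre
  unfold Spec_total_fruit_cost total_fruit_cost total_fruit_cost_alt
  have hempty : ((PySem.Dict.ofList fruit_prices).keys.filter
      (fun k => !((PySem.Dict.ofList fruit_qty).contains k))).isEmpty = true := by
    rw [List.isEmpty_iff, List.filter_eq_nil_iff]
    intro k hk
    simp [hpre k hk]
  simp only [hempty, if_true]
  rw [pv_fold_eq_sum _ _ _ hpre 0, zero_add,
      PySem.Dict.items_eq_map_keys (PySem.Dict.ofList fruit_qty)
        (PySem.Dict.nodup_keys_ofList _) 0]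
  rw [List.map_map]
  exact (pv_sum_swap _ _ (PySem.Dict.nodup_keys_ofList _) (PySem.Dict.nodup_keys_ofList _) hpre).symm
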